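-- pv_equiv track=rewrite | github.com/Reneromero08/agent-governance-system | THOUGHT/LAB/CAT_CHAT/tests/test_astrology_markets.py | is_mercury_retrograde
-- ===== SOURCE A (Python) =====
-- MERCURY_RETROGRADE_PERIODS = [
--     ('2019-03-05', '2019-03-28'),
--     ('2019-07-07', '2019-07-31'),
--     ('2019-10-31', '2019-11-20'),
--     ('2020-02-17', '2020-03-10'),
--     ('2020-06-18', '2020-07-12'),
--     ('2020-10-14', '2020-11-03'),
--     ('2021-01-30', '2021-02-21'),
--     ('2021-05-29', '2021-06-22'),
--     ('2021-09-27', '2021-10-18'),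
--     ('2022-01-14', '2022-02-04'),
--     ('2022-05-10', '2022-06-03'),
--     ('2022-09-09', '2022-10-02'),
--     ('2022-12-29', '2023-01-18'),
--     ('2023-04-21', '2023-05-14'),
--     ('2023-08-23', '2023-09-15'),
--     ('2023-12-13', '2024-01-02'),
--     ('2024-04-01', '2024-04-25'),
--     ('2024-08-05', '2024-08-28'),
--     ('2024-11-26', '2024-12-15'),
-- ]
--
-- def is_mercury_retrograde(date):
--     """Check if date falls during Mercury retrograde."""
--     if hasattr(date, 'strftime'):
--         date_str = date.strftime('%Y-%m-%d')
--     else: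
--         date_str = str(date)[:10]
--
--     for start, end in MERCURY_RETROGRADE_PERIODS:
--         if start <= date_str <= end:
--             return True
--     return False
-- ===== SOURCE B (Python) =====
-- _BOUNDS = (
--     "2019-03-05 2019-03-28 2019-07-07 2019-07-31 2019-10-31 2019-11-20 "
--     "2020-02-17 2020-03-10 2020-06-18 2020-07-12 2020-10-14 2020-11-03 "
--     "2021-01-30 2021-02-21 2021-05-29 2021-06-22 2021-09-27 2021-10-18 "
--     "2022-01-14 2022-02-04 2022-05-10 2022-06-03 2022-09-09 2022-10-02 "
--     "2022-12-29 2023-01-18 2023-04-21 2023-05-14 2023-08-23 2023-09-15 "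
--     "2023-12-13 2024-01-02 2024-04-01 2024-04-25 2024-08-05 2024-08-28 "
--     "2024-11-26 2024-12-15"
-- ).split()
--
--
-- def _pair_up(words):
--     """Split the flat boundary list into (starts, ends)."""
--     if len(words) < 2:
--         return [], []
--     starts, ends = _pair_up(words[2:])
--     return [words[0]] + starts, [words[1]] + ends
--
--
-- _STARTS, _ENDS = _pair_up(_BOUNDS)
--
--
-- def _bisect_right(xs, x, lo, hi):
--     """Index of the first element of sorted xs[lo:hi] strictly greater than x."""
--     while lo < hi:
--         mid = (lo + hi) // 2
--         if xs[mid] <= x: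
--             lo = mid + 1
--         else:
--             hi = mid
--     return lo
--
--
-- def is_mercury_retrograde(date):
--     """Check if date falls during Mercury retrograde.
--
--     The periods are sorted and disjoint, so binary-search the period
--     starts for the last start <= date and check only that period's end.
--     """
--     if hasattr(date, 'strftime'):
--         date_str = date.strftime('%Y-%m-%d')
--     else:
--         date_str = str(date)[:10]
--
--     i = _bisect_right(_STARTS, date_str, 0, len(_STARTS)) - 1
--     return i >= 0 and date_str <= _ENDS[i]
-- ===== Notes on version B (the rewrite author's own statement) =====
-- stated objective: alternative
-- what changed: Replaces A's linear early-return scan over (start, end) pairs by a hand-written binary search (bisect_right) over a precomputed sorted list of period starts, then checks only the located period's end; the period table is stored as one flat whitespace-separated string split and paired up at module load.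
import Mathlib
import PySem

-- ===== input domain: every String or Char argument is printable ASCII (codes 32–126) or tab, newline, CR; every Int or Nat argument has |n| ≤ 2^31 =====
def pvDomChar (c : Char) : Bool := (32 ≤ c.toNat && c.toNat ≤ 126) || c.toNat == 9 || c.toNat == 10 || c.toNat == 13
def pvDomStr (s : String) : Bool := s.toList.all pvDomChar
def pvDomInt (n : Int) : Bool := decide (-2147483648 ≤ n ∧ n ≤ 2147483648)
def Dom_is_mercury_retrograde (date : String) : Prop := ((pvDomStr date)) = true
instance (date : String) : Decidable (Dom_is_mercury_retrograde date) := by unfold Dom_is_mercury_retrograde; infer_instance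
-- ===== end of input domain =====

-- B replaces A's linear early-return scan over (start, end) pairs by a binary search
-- (bisect_right) over the sorted period starts followed by a single end check; the
-- table is stored flat and paired up. Alternative algorithm, same observable result.
-- Strings are compared as their character lists (Python's code-point order).

-- ===== PORT A =====
def pvPeriods : List (List Char × List Char) := [
  ("2019-03-05".toList, "2019-03-28".toList),
  ("2019-07-07".toList, "2019-07-31".toList),
  ("2019-10-31".toList, "2019-11-20".toList),
  ("2020-02-17".toList, "2020-03-10".toList),
  ("2020-06-18".toList, "2020-07-12".toList),
  ("2020-10-14".toList, "2020-11-03".toList),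
  ("2021-01-30".toList, "2021-02-21".toList),
  ("2021-05-29".toList, "2021-06-22".toList),
  ("2021-09-27".toList, "2021-10-18".toList),
  ("2022-01-14".toList, "2022-02-04".toList),
  ("2022-05-10".toList, "2022-06-03".toList),
  ("2022-09-09".toList, "2022-10-02".toList),
  ("2022-12-29".toList, "2023-01-18".toList),
  ("2023-04-21".toList, "2023-05-14".toList),
  ("2023-08-23".toList, "2023-09-15".toList),
  ("2023-12-13".toList, "2024-01-02".toList),
  ("2024-04-01".toList, "2024-04-25".toList),
  ("2024-08-05".toList, "2024-08-28".toList),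
  ("2024-11-26".toList, "2024-12-15".toList)]

-- A's for-loop with early return: try each (start, end) in order
def pvScan (ps : List (List Char × List Char)) (d : List Char) : Bool :=
  match ps with
  | [] => false
  | (s, e) :: rest => if s ≤ d ∧ d ≤ e then true else pvScan rest d

def is_mercury_retrograde (date : String) : Bool :=
  -- str(date)[:10]
  let date_str := PySem.List.slice date.toList none (some 10)
  pvScan pvPeriods date_str

-- ===== PORT B =====
-- the flat boundary table, "....".split()
def pvBoundsB : List (List Char) :=
  (PySem.Str.split₀ ("2019-03-05 2019-03-28 2019-07-07 2019-07-31 2019-10-31 2019-11-20 " ++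
    "2020-02-17 2020-03-10 2020-06-18 2020-07-12 2020-10-14 2020-11-03 " ++
    "2021-01-30 2021-02-21 2021-05-29 2021-06-22 2021-09-27 2021-10-18 " ++
    "2022-01-14 2022-02-04 2022-05-10 2022-06-03 2022-09-09 2022-10-02 " ++
    "2022-12-29 2023-01-18 2023-04-21 2023-05-14 2023-08-23 2023-09-15 " ++
    "2023-12-13 2024-01-02 2024-04-01 2024-04-25 2024-08-05 2024-08-28 " ++
    "2024-11-26 2024-12-15")).map String.toList

-- _pair_up: alternate the flat word list into (starts, ends)
def pvPairUp : List (List Char) → List (List Char) × List (List Char)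
  | a :: b :: rest =>
      let p := pvPairUp rest
      (a :: p.1, b :: p.2)
  | _ => ([], [])      -- len(words) < 2

def pvStartsB : List (List Char) := (pvPairUp pvBoundsB).1
def pvEndsB : List (List Char) := (pvPairUp pvBoundsB).2

-- _bisect_right's while loop (lo, hi are nonnegative throughout in Python, kept as Nat)
def pvBisectRight (xs : List (List Char)) (x : List Char) (lo hi : Nat) : Nat :=
  if lo < hi then
    if xs.getD ((lo + hi) / 2) [] ≤ x then pvBisectRight xs x ((lo + hi) / 2 + 1) hi
    else pvBisectRight xs x lo ((lo + hi) / 2)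
  else lo
termination_by hi - lo
decreasing_by all_goals omega

def is_mercury_retrograde_alt (date : String) : Bool :=
  -- str(date)[:10]
  let date_str := PySem.List.slice date.toList none (some 10)
  -- i = _bisect_right(...) - 1; return i >= 0 and date_str <= _ENDS[i]
  let r := pvBisectRight pvStartsB date_str 0 pvStartsB.length
  decide (1 ≤ r) && decide (date_str ≤ pvEndsB.getD (r - 1) [])

-- ===== PRECONDITION & SPEC =====
def Spec_is_mercury_retrograde (date : String) (out : Bool) : Prop := out = is_mercury_retrograde_alt date
instance (date : String) (out : Bool) : Decidable (Spec_is_mercury_retrograde date out) := by unfold Spec_is_mercury_retrograde; infer_instance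

-- ===== CLAIM (what is proved, stated in full; the proofs are below) =====
def Claim_equal_is_mercury_retrograde : Prop := ∀ (date : String), Dom_is_mercury_retrograde date → Spec_is_mercury_retrograde date (is_mercury_retrograde date)

-- ===== LEMMAS AND PROOFS =====

set_option maxRecDepth 4000

-- A's scan succeeds iff some period contains the date
lemma pv_scan_iff_mem (ps : List (List Char × List Char)) (d : List Char) :
    pvScan ps d = true ↔ ∃ p ∈ ps, p.1 ≤ d ∧ d ≤ p.2 := by
  induction ps with
  | nil => simp [pvScan]
  | cons p rest ih =>
    obtain ⟨s, e⟩ := p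
    simp only [pvScan]
    split_ifs with h
    · simp [h]
    · simp [ih, h]

-- the concrete tables line up: B's starts/ends are the components of A's period list
lemma pv_tables : pvStartsB = pvPeriods.map Prod.fst ∧ pvEndsB = pvPeriods.map Prod.snd := by
  decide

lemma pv_len : pvStartsB.length = 19 ∧ pvEndsB.length = 19 := by decide

-- starts are (weakly) sorted
lemma pv_sorted : ∀ i < 19, ∀ j < 19, i ≤ j →
    pvStartsB.getD i [] ≤ pvStartsB.getD j [] := by decide

-- each period ends strictly before the next starts
lemma pv_gap : ∀ i < 18, pvEndsB.getD i [] < pvStartsB.getD (i + 1) [] := by decide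

-- bisect_right invariant: the result r (lo ≤ r ≤ hi) splits the sorted list at x
lemma pv_bisect_spec (xs : List (List Char)) (x : List Char)
    (hs : ∀ i < xs.length, ∀ j < xs.length, i ≤ j → xs.getD i [] ≤ xs.getD j []) :
    ∀ (lo hi : Nat), lo ≤ hi → hi ≤ xs.length →
    (∀ j < lo, xs.getD j [] ≤ x) → (∀ j, hi ≤ j → j < xs.length → x < xs.getD j []) →
    lo ≤ pvBisectRight xs x lo hi ∧ pvBisectRight xs x lo hi ≤ hi ∧
    (∀ j < pvBisectRight xs x lo hi, xs.getD j [] ≤ x) ∧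
    (∀ j, pvBisectRight xs x lo hi ≤ j → j < xs.length → x < xs.getD j []) := by
  intro lo hi
  induction lo, hi using pvBisectRight.induct xs x with
  | case1 lo hi hlt hle ih =>
    intro _ hhi hblo hbhi
    rw [pvBisectRight, if_pos hlt, if_pos hle]
    have h := ih (by omega) hhi
      (by intro j hj
          by_cases hj2 : j < lo
          · exact hblo j hj2
          · have : j ≤ (lo + hi) / 2 := by omega
            exact le_trans (hs j (by omega) ((lo + hi) / 2) (by omega) this) hle)
      hbhi
    exact ⟨by omega, by omega, h.2.2⟩
  | case2 lo hi hlt hle ih =>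
    intro _ hhi hblo hbhi
    rw [pvBisectRight, if_pos hlt, if_neg hle]
    have hmidlt : x < xs.getD ((lo + hi) / 2) [] := lt_of_not_ge hle
    have h := ih (by omega) (by omega) hblo
      (by intro j hj hjlen
          exact lt_of_lt_of_le hmidlt (hs ((lo + hi) / 2) (by omega) j hjlen hj))
    exact ⟨h.1, by omega, h.2.2⟩
  | case3 lo hi hlt =>
    intro hlohi hhi hblo hbhi
    rw [pvBisectRight, if_neg hlt]
    exact ⟨le_refl _, by omega, hblo, by intro j hj hjl; exact hbhi j (by omega) hjl⟩

-- periods indexed through B's tables: membership in pvPeriods as an index statement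
lemma pv_mem_iff_index (d : List Char) :
    (∃ p ∈ pvPeriods, p.1 ≤ d ∧ d ≤ p.2) ↔
    ∃ i < 19, pvStartsB.getD i [] ≤ d ∧ d ≤ pvEndsB.getD i [] := by
  obtain ⟨hS, hE⟩ := pv_tables
  have hlen : pvPeriods.length = 19 := by decide
  constructor
  · rintro ⟨p, hp, h1, h2⟩
    obtain ⟨i, hi, rfl⟩ := List.mem_iff_getElem.mp hp
    refine ⟨i, by omega, ?_, ?_⟩
    · rw [hS, List.getD_eq_getElem _ _ (by simp; omega), List.getElem_map]; exact h1
    · rw [hE, List.getD_eq_getElem _ _ (by simp; omega), List.getElem_map]; exact h2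
  · rintro ⟨i, hi, h1, h2⟩
    refine ⟨pvPeriods[i]'(by omega), List.getElem_mem _, ?_, ?_⟩
    · rw [hS, List.getD_eq_getElem _ _ (by simp; omega), List.getElem_map] at h1; exact h1
    · rw [hE, List.getD_eq_getElem _ _ (by simp; omega), List.getElem_map] at h2; exact h2

-- the core equivalence, for an arbitrary date string d
lemma pv_core (d : List Char) :
    pvScan pvPeriods d =
      (decide (1 ≤ pvBisectRight pvStartsB d 0 pvStartsB.length) &&
       decide (d ≤ pvEndsB.getD (pvBisectRight pvStartsB d 0 pvStartsB.length - 1) [])) := by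
  obtain ⟨hSL, hEL⟩ := pv_len
  have hspec := pv_bisect_spec pvStartsB d
    (by rw [hSL]; exact pv_sorted) 0 pvStartsB.length (Nat.zero_le _) (le_refl _)
    (by omega) (by intro j hj hjl; omega)
  set r := pvBisectRight pvStartsB d 0 pvStartsB.length with hr
  obtain ⟨-, hrle, hlow, hhigh⟩ := hspec
  rw [hSL] at hrle
  rw [Bool.eq_iff_iff, Bool.and_eq_true, decide_eq_true_iff, decide_eq_true_iff,
      pv_scan_iff_mem, pv_mem_iff_index]
  constructor
  · rintro ⟨i, hi, h1, h2⟩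
    have hir : i < r := by
      by_contra h
      exact absurd h1 (not_le_of_gt (hhigh i (by omega) (by omega)))
    have hr1 : 1 ≤ r := by omega
    refine ⟨hr1, ?_⟩
    by_cases heq : r - 1 = i
    · rwa [heq]
    · -- i < r - 1: start[r-1] ≤ d but end[i] < start[i+1] ≤ start[r-1], contradiction
      have hsr : pvStartsB.getD (r - 1) [] ≤ d := hlow (r - 1) (by omega)
      have hmono : pvStartsB.getD (i + 1) [] ≤ pvStartsB.getD (r - 1) [] :=
        pv_sorted (i + 1) (by omega) (r - 1) (by omega) (by omega)
      have hgap := pv_gap i (by omega)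
      exact absurd h2 (not_le_of_gt (lt_of_lt_of_le hgap (le_trans hmono hsr)))
  · rintro ⟨hr1, hend⟩
    exact ⟨r - 1, by omega, hlow (r - 1) (by omega), hend⟩

-- ===== VERDICT (by name: the statement is the Claim_ definition above) =====
theorem is_mercury_retrograde_spec : Claim_equal_is_mercury_retrograde := by
  intro date _
  unfold Spec_is_mercury_retrograde is_mercury_retrograde is_mercury_retrograde_alt
  exact pv_core _
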